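-- pv_equiv track=rewrite | github.com/kwoncha/first_repo | python practice/back/2447재귀.py | kan
-- ===== SOURCE A (Python) =====
-- def kan(n):
--     if n == 1:
--         return ['*']
--     start = kan(n//3)
--     arr = []
--     for s in start:
--         arr.append(s*3)
--     for s in start:
--         arr.append(s+' '*(n//3)+s)
--     for s in start:
--         arr.append(s*3)
--     return arr
-- ===== SOURCE B (Python) =====
-- def kan(n):
--     # Iterative bottom-up: collect the sizes the recursion would descend through,
--     # then grow the pattern from ['*'] back up to size n.
--     sizes = []
--     m = n
--     while m > 1:
--         sizes.append(m)
--         m //= 3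
--     result = ['*']
--     for size in reversed(sizes):
--         w = size // 3
--         tri = [s * 3 for s in result]
--         result = tri + [s + ' ' * w + s for s in result] + tri
--     return result
-- ===== Notes on version B (the rewrite author's own statement) =====
-- stated objective: alternative
-- what changed: Replaced the top-down recursion by an iterative bottom-up build: first collect the size chain n, n//3, ... down to 1 with a loop, then grow the pattern from ['*'] back up with one concatenation step per size.
-- outside the precondition, e.g. on kan(2): A raises RecursionError, B returns ['***', '**', '***']
import Mathlib
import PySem

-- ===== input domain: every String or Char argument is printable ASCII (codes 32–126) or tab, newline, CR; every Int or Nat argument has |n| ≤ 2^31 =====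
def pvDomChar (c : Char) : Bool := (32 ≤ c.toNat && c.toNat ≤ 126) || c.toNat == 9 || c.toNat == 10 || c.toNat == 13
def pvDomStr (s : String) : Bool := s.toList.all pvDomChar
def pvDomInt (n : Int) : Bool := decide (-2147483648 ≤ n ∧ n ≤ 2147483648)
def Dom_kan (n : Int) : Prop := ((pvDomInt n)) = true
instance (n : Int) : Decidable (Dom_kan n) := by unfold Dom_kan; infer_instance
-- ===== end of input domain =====

-- B builds the same fractal bottom-up with a loop over the size chain instead of top-down recursion.


-- ===== PORT A =====
-- Python string repetition s * k (shared primitive, used by both ports for `s*3` / `' '*w`)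
def strMul (s : String) (k : Int) : String := String.mk (PySem.List.pyRepeat s.toList k)

-- A recurses on n//3 and diverges (RecursionError) off Pre_; the fuel only makes the port
-- total, it is always sufficient on Pre_ (fuel exhaustion returns []).
def kanFuel : Nat → Int → List String
  | 0, _ => []
  | f+1, n =>
    if n = 1 then ["*"]
    else
      let start := kanFuel f (PySem.Int.floordiv n 3)
      let arr : List String := []
      let arr := arr ++ start.map (fun s => strMul s 3)
      let arr := arr ++ start.map (fun s => s ++ strMul " " (PySem.Int.floordiv n 3) ++ s)
      let arr := arr ++ start.map (fun s => strMul s 3)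
      arr

def kan (n : Int) : List String := kanFuel (n.toNat + 1) n

-- ===== PORT B =====
-- the while loop `while m > 1: sizes.append(m); m //= 3`; fuel m.toNat always suffices
def sizesAux : Nat → Int → List Int
  | 0, _ => []
  | f+1, m => if 1 < m then m :: sizesAux f (PySem.Int.floordiv m 3) else []

-- one iteration of B's for loop over the reversed size list
def stepUp (result : List String) (size : Int) : List String :=
  let w := PySem.Int.floordiv size 3
  let tri := result.map (fun s => strMul s 3)
  tri ++ result.map (fun s => s ++ strMul " " w ++ s) ++ tri

def kan_alt (n : Int) : List String :=
  (sizesAux n.toNat n).reverse.foldl stepUp ["*"]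

-- ===== PRECONDITION & SPEC =====
-- Pre_ excludes exactly the inputs on which A's recursion never reaches 1 and raises
-- RecursionError: the n//3-chain of n hits 1 iff 3^k ≤ n < 2*3^k for some k (k ≤ 32 covers all of Dom).
def Pre_kan (n : Int) : Prop := ∃ k ∈ Finset.range 33, (3:Int)^k ≤ n ∧ n < 2 * 3^k
instance (n : Int) : Decidable (Pre_kan n) := by unfold Pre_kan; infer_instance
def pvWitness_kan : Int := (3)

def Spec_kan (n : Int) (out : List String) : Prop := out = kan_alt n
instance (n : Int) (out : List String) : Decidable (Spec_kan n out) := by unfold Spec_kan; infer_instance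

-- ===== CLAIM (what is proved, stated in full; the proofs are below) =====
def Claim_equal_kan : Prop := ∀ (n : Int), Dom_kan n → Pre_kan n → Spec_kan n (kan n)

-- ===== LEMMAS AND PROOFS =====

lemma floordiv3_lt {m : Int} (hm : 0 < m) : PySem.Int.floordiv m 3 < m := by
  rw [PySem.Int.floordiv_lt_iff_lt_mul (by norm_num)]
  nlinarith

lemma floordiv3_nonneg {m : Int} (hm : 0 ≤ m) : 0 ≤ PySem.Int.floordiv m 3 := by
  rw [PySem.Int.le_floordiv_iff_mul_le (by norm_num)]
  simpa using hm

-- the fuel for the while loop is irrelevant once it is at least m.toNat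
lemma sizesAux_fuel : ∀ (f₁ f₂ : Nat) (m : Int), m.toNat ≤ f₁ → m.toNat ≤ f₂ →
    sizesAux f₁ m = sizesAux f₂ m := by
  intro f₁
  induction f₁ with
  | zero =>
    intro f₂ m h1 _
    have hm : ¬ (1 < m) := by omega
    cases f₂ with
    | zero => rfl
    | succ f => simp [sizesAux, hm]
  | succ f₁ ih =>
    intro f₂ m h1 h2
    cases f₂ with
    | zero =>
      have hm : ¬ (1 < m) := by omega
      simp [sizesAux, hm]
    | succ f₂ =>
      by_cases hm : 1 < m
      · have hlt := floordiv3_lt (m := m) (by omega)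
        have hge := floordiv3_nonneg (m := m) (by omega)
        simp only [sizesAux, if_pos hm]
        rw [ih f₂ (PySem.Int.floordiv m 3) (by omega) (by omega)]
      · simp [sizesAux, hm]

-- B's loop satisfies A's recurrence on the terminating side
lemma kan_alt_step (m : Int) (hm : 1 < m) :
    kan_alt m = stepUp (kan_alt (PySem.Int.floordiv m 3)) m := by
  have hlt := floordiv3_lt (m := m) (by omega)
  have hge := floordiv3_nonneg (m := m) (by omega)
  obtain ⟨t, ht⟩ : ∃ t, m.toNat = t + 1 := ⟨m.toNat - 1, by omega⟩
  unfold kan_alt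
  rw [ht]
  simp only [sizesAux, if_pos hm]
  rw [sizesAux_fuel t (PySem.Int.floordiv m 3).toNat (PySem.Int.floordiv m 3) (by omega) (by omega)]
  simp [List.foldl_append]

lemma kanFuel_step (f : Nat) (n : Int) (hn : n ≠ 1) :
    kanFuel (f+1) n = stepUp (kanFuel f (PySem.Int.floordiv n 3)) n := by
  simp [kanFuel, stepUp, hn, List.append_assoc]

lemma kan_eq_alt : ∀ (k : Nat) (n : Int) (f : Nat),
    (3:Int)^k ≤ n → n < 2 * 3^k → k < f → kanFuel f n = kan_alt n := by
  intro k
  induction k with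
  | zero =>
    intro n f h1 h2 hf
    have hn : n = 1 := by norm_num at h1 h2; omega
    obtain ⟨f', rfl⟩ : ∃ f', f = f' + 1 := ⟨f - 1, by omega⟩
    subst hn
    simp [kanFuel, kan_alt, sizesAux]
  | succ k ih =>
    intro n f h1 h2 hf
    have h3 : (3:Int) ≤ 3^(k+1) := by
      calc (3:Int) = 3^1 := by norm_num
      _ ≤ 3^(k+1) := by
        apply pow_le_pow_right₀ <;> omega
    have hn1 : 1 < n := by omega
    obtain ⟨f', rfl⟩ : ∃ f', f = f' + 1 := ⟨f - 1, by omega⟩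
    rw [kanFuel_step f' n (by omega), kan_alt_step n hn1]
    congr 1
    apply ih
    · rw [PySem.Int.le_floordiv_iff_mul_le (by norm_num)]
      calc (3:Int)^k * 3 = 3^(k+1) := by ring
      _ ≤ n := h1
    · rw [PySem.Int.floordiv_lt_iff_lt_mul (by norm_num)]
      calc n < 2 * 3^(k+1) := h2
      _ = 2 * 3^k * 3 := by ring
    · omega

-- ===== VERDICT (by name: the statement is the Claim_ definition above) =====
theorem kan_spec : Claim_equal_kan := by
  intro n _ hpre
  obtain ⟨k, _, h1, h2⟩ := hpre
  have hk' : k < 3^k := Nat.lt_pow_self (by norm_num : 1 < 3)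
  have hk : (k:Int) < 3^k := by exact_mod_cast hk'
  unfold Spec_kan kan
  exact kan_eq_alt k n (n.toNat + 1) h1 h2 (by omega)
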